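-- pv_equiv track=rewrite | github.com/CarterCahill25/Class-Work | Class Projects/Computer Science 1 HW/hw5b.py | parse
-- ===== SOURCE A (Python) =====
-- def parse(s):
--     s = s + " " #add a space to the end of the string
--     s = s.lower() #lowercase all letters in string
--     s = [s] #make s a list
--     index = 0
--     word = ""
--     processing = False #set processing to false to start off
--     newList = []
--     while index < len(s[0]): #while s is smaller than s's length
--         S = (s[0][index]) #save S as the element at that index
--         if "a" <= S <= "z": #to check if a symbol is a letter
--             processing = True #if so start processing
--             word = word + str(s[0][index])
--         else: #if not a letter
--             if processing: #and you are processing a word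
--                 if len(word) >= 4: #check if it a long enough word
--                     Word = [(word)]
--                     newList = newList + (Word) # add word to the list of words
--                     processing = False #no longer processing a word
--                 word = ""
--         index = index + 1
--     return(newList)
-- ===== SOURCE B (Python) =====
-- import re
--
-- def parse(s):
--     return [w for w in re.findall(r"[a-z]+", s.lower()) if len(w) >= 4]
-- ===== Notes on version B (the rewrite author's own statement) =====
-- stated objective: faster
-- what changed: Replaces the manual index/word/processing state machine (with its trailing-space hack and quadratic string/list concatenations) by a regex extraction of maximal [a-z] runs followed by a length filter.
import Mathlib
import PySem

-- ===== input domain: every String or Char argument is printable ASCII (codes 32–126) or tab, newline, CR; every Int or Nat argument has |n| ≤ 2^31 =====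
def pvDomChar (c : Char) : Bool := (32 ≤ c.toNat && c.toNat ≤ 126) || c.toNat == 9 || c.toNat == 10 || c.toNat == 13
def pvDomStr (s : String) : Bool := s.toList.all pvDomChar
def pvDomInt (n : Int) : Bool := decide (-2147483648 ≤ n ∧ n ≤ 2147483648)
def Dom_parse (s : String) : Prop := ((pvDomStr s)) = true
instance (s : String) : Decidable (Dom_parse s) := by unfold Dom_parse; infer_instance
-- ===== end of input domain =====

-- B replaces A's index/word/processing state machine (and its trailing-space hack) by a
-- regex-style extraction of maximal [a-z] runs followed by a length-≥-4 filter (objective: idiomatic).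

-- ===== PORT A =====
-- the while loop of A: state = (remaining chars, word, processing, newList)
def parseLoop : List Char → List Char → Bool → List String → List String
  | [], _word, _proc, acc => acc
  | c :: rest, word, proc, acc =>
    if 'a' ≤ c ∧ c ≤ 'z' then
      parseLoop rest (word ++ [c]) true acc
    else if proc then
      if 4 ≤ word.length then parseLoop rest [] false (acc ++ [String.ofList word])
      else parseLoop rest [] proc acc
    else parseLoop rest word proc acc

def parse (s : String) : List String :=
  -- s = (s + " ").lower(), then the while loop over its characters
  parseLoop (PySem.Chars.lower ((s ++ " ").toList)) [] false []

-- ===== PORT B =====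
-- runsAux = re.findall(r"[a-z]+", ·): maximal runs of lowercase letters (cur = the open run)
def runsAux : List Char → List Char → List (List Char)
  | cur, [] => if cur = [] then [] else [cur]
  | cur, c :: rest =>
    if 'a' ≤ c ∧ c ≤ 'z' then runsAux (cur ++ [c]) rest
    else if cur = [] then runsAux [] rest
    else cur :: runsAux [] rest

def parse_alt (s : String) : List String :=
  ((runsAux [] (PySem.Chars.lower s.toList)).filter (fun w => 4 ≤ w.length)).map String.ofList

-- ===== PRECONDITION & SPEC =====
def Spec_parse (s : String) (out : List String) : Prop := out = parse_alt s
instance (s : String) (out : List String) : Decidable (Spec_parse s out) := by unfold Spec_parse; infer_instance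

-- ===== CLAIM (what is proved, stated in full; the proofs are below) =====
def Claim_equal_parse : Prop := ∀ (s : String), Dom_parse s → Spec_parse s (parse s)

-- ===== LEMMAS AND PROOFS =====

-- loop invariant: running A's loop on cs followed by the appended space yields acc ++ the
-- filtered runs of cs with pending word `word`, provided proc = false forces word = []
theorem parseLoop_eq_runsAux (cs : List Char) : ∀ (word : List Char) (proc : Bool)
    (acc : List String), (proc = false → word = []) →
    parseLoop (cs ++ [' ']) word proc acc
      = acc ++ ((runsAux word cs).filter (fun w => 4 ≤ w.length)).map String.ofList := by
  induction cs with
  | nil =>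
    intro word proc acc h
    cases proc with
    | false => simp [h rfl, parseLoop, runsAux]
    | true =>
      by_cases hw : 4 ≤ word.length
      · have hne : word ≠ [] := by intro e; simp [e] at hw
        simp [parseLoop, runsAux, hne, hw]
      · by_cases he : word = [] <;> simp [parseLoop, runsAux, hw, he]
  | cons c rest ih =>
    intro word proc acc h
    by_cases hc : 'a' ≤ c ∧ c ≤ 'z'
    · simp only [List.cons_append, parseLoop, runsAux, if_pos hc]
      exact ih (word ++ [c]) true acc (by simp)
    · simp only [List.cons_append, parseLoop, runsAux, if_neg hc]
      cases proc with
      | false =>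
        simp only [Bool.false_eq_true, if_neg (by simp : ¬False), h rfl]
        simpa [h rfl] using ih [] false acc (fun _ => rfl)
      | true =>
        by_cases hw : 4 ≤ word.length
        · have hne : word ≠ [] := by intro e; simp [e] at hw
          rw [if_pos hw, if_neg hne, ih [] false (acc ++ [String.ofList word]) (fun _ => rfl)]
          simp [hw]
        · rw [if_neg hw]
          by_cases he : word = []
          · rw [if_pos he, he, ih [] true acc (by simp)]; simp
          · rw [if_neg he, ih [] true acc (by simp)]
            simp [hw]

-- lowering distributes over the appended trailing space
theorem lower_append_space (cs : List Char) :
    PySem.Chars.lower (cs ++ [' ']) = PySem.Chars.lower cs ++ [' '] := by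
  simp [PySem.Chars.lower, PySem.Chars.lowerChar, PySem.Chars.isupper]

-- ===== VERDICT (by name: the statement is the Claim_ definition above) =====
theorem parse_spec : Claim_equal_parse := by
  intro s _
  unfold Spec_parse parse parse_alt
  rw [show (s ++ " ").toList = s.toList ++ [' '] by simp, lower_append_space,
    parseLoop_eq_runsAux (PySem.Chars.lower s.toList) [] false [] (fun _ => rfl)]
  simp
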